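-- pv_equiv track=rewrite | github.com/Lucas-Granucci/Averroes-AI | data_pipeline/generate_statistics.py | analyze_sentence_distribution
-- ===== SOURCE A (Python) =====
-- def analyze_sentence_distribution(sentences_data):
--     """Analyze sentence length distribution in bins."""
--     lengths = [len(s) for s in sentences_data]
--
--     bins = {"0-50": 0, "51-100": 0, "101-200": 0, "201-300": 0, "301-400": 0, "401+": 0}
--
--     for length in lengths:
--         if length <= 50:
--             bins["0-50"] += 1
--         elif length <= 100:
--             bins["51-100"] += 1
--         elif length <= 200:
--             bins["101-200"] += 1
--         elif length <= 300:
--             bins["201-300"] += 1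
--         elif length <= 400:
--             bins["301-400"] += 1
--         else:
--             bins["401+"] += 1
--
--     return bins
-- ===== SOURCE B (Python) =====
-- def _bisect_right(a, x):
--     lo, hi = 0, len(a)
--     while lo < hi:
--         mid = (lo + hi) // 2
--         if x < a[mid]:
--             hi = mid
--         else:
--             lo = mid + 1
--     return lo
--
--
-- def analyze_sentence_distribution(sentences_data):
--     """Analyze sentence length distribution in bins (sort + binary-search cumulative counts)."""
--     lengths = sorted(len(s) for s in sentences_data)
--     c1 = _bisect_right(lengths, 50)
--     c2 = _bisect_right(lengths, 100)
--     c3 = _bisect_right(lengths, 200)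
--     c4 = _bisect_right(lengths, 300)
--     c5 = _bisect_right(lengths, 400)
--     return {
--         "0-50": c1,
--         "51-100": c2 - c1,
--         "101-200": c3 - c2,
--         "201-300": c4 - c3,
--         "301-400": c5 - c4,
--         "401+": len(lengths) - c5,
--     }
-- ===== Notes on version B (the rewrite author's own statement) =====
-- stated objective: alternative
-- what changed: Replaced the single pass with a six-way if/elif chain updating a dict by a sort of the lengths followed by binary-search (bisect_right) cumulative counts, each bin being the difference of consecutive cumulative positions.
import Mathlib
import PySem

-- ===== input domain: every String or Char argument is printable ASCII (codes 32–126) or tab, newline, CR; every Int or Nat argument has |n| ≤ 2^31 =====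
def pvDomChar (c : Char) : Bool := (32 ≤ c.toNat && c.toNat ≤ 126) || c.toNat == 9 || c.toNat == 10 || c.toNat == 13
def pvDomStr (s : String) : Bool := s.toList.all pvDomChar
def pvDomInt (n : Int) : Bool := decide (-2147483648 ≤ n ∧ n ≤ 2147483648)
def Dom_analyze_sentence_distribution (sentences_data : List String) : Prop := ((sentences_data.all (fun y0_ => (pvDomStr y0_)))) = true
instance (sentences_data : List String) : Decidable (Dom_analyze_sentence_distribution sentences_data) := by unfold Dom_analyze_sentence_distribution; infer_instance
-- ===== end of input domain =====

-- B replaces A's one-pass if/elif dict counting by sort + bisect_right cumulative counts (alternative decomposition, not claimed faster).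

-- ===== PORT A =====
-- the body of A's for-loop: the if/elif chain incrementing one bin
def aStep (b : PySem.Dict String Int) (length : Int) : PySem.Dict String Int :=
  if length ≤ 50 then b.modify "0-50" 0 (· + 1)
  else if length ≤ 100 then b.modify "51-100" 0 (· + 1)
  else if length ≤ 200 then b.modify "101-200" 0 (· + 1)
  else if length ≤ 300 then b.modify "201-300" 0 (· + 1)
  else if length ≤ 400 then b.modify "301-400" 0 (· + 1)
  else b.modify "401+" 0 (· + 1)

def analyze_sentence_distribution (sentences_data : List String) : List (String × Int) :=
  let lengths : List Int := sentences_data.map (fun s => (PySem.Str.len s : Int))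
  let bins : PySem.Dict String Int :=
    PySem.Dict.mk [("0-50", 0), ("51-100", 0), ("101-200", 0), ("201-300", 0), ("301-400", 0), ("401+", 0)]
  (lengths.foldl aStep bins).items

-- ===== PORT B =====
-- _bisect_right in Source B is the standard bisect_right loop, ported as PySem.List.bisectRight (the same lo/hi midpoint loop)
def analyze_sentence_distribution_alt (sentences_data : List String) : List (String × Int) :=
  let lengths : List Int :=
    PySem.List.sorted (sentences_data.map (fun s => (PySem.Str.len s : Int))) (fun x => x) false
  let c1 : Int := PySem.List.bisectRight lengths 50
  let c2 : Int := PySem.List.bisectRight lengths 100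
  let c3 : Int := PySem.List.bisectRight lengths 200
  let c4 : Int := PySem.List.bisectRight lengths 300
  let c5 : Int := PySem.List.bisectRight lengths 400
  [("0-50", c1), ("51-100", c2 - c1), ("101-200", c3 - c2), ("201-300", c4 - c3),
   ("301-400", c5 - c4), ("401+", (lengths.length : Int) - c5)]

-- ===== PRECONDITION & SPEC =====
def Spec_analyze_sentence_distribution (sentences_data : List String) (out : List (String × Int)) : Prop := out = analyze_sentence_distribution_alt sentences_data
instance (sentences_data : List String) (out : List (String × Int)) : Decidable (Spec_analyze_sentence_distribution sentences_data out) := by unfold Spec_analyze_sentence_distribution; infer_instance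

-- ===== CLAIM (what is proved, stated in full; the proofs are below) =====
def Claim_equal_analyze_sentence_distribution : Prop := ∀ (sentences_data : List String), Dom_analyze_sentence_distribution sentences_data → Spec_analyze_sentence_distribution sentences_data (analyze_sentence_distribution sentences_data)

-- ===== LEMMAS AND PROOFS =====

-- each branch of aStep on the six-key literal dict increments exactly one entry
lemma aStep_bins (a b c d e f l : Int) :
    aStep (PySem.Dict.mk
      [("0-50", a), ("51-100", b), ("101-200", c), ("201-300", d), ("301-400", e), ("401+", f)]) l
    = PySem.Dict.mk
      (if l ≤ 50 then [("0-50", a + 1), ("51-100", b), ("101-200", c), ("201-300", d), ("301-400", e), ("401+", f)]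
       else if l ≤ 100 then [("0-50", a), ("51-100", b + 1), ("101-200", c), ("201-300", d), ("301-400", e), ("401+", f)]
       else if l ≤ 200 then [("0-50", a), ("51-100", b), ("101-200", c + 1), ("201-300", d), ("301-400", e), ("401+", f)]
       else if l ≤ 300 then [("0-50", a), ("51-100", b), ("101-200", c), ("201-300", d + 1), ("301-400", e), ("401+", f)]
       else if l ≤ 400 then [("0-50", a), ("51-100", b), ("101-200", c), ("201-300", d), ("301-400", e + 1), ("401+", f)]
       else [("0-50", a), ("51-100", b), ("101-200", c), ("201-300", d), ("301-400", e), ("401+", f + 1)]) := by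
  unfold aStep
  split_ifs <;> rfl

-- A's fold over the six-key dict just accumulates the count of each (disjoint) range
lemma aFold_items (L : List Int) (a b c d e f : Int) :
    (L.foldl aStep (PySem.Dict.mk
      [("0-50", a), ("51-100", b), ("101-200", c), ("201-300", d), ("301-400", e), ("401+", f)])).items
    = [("0-50", a + L.countP (fun l => decide (l ≤ 50))),
       ("51-100", b + L.countP (fun l => decide (50 < l ∧ l ≤ 100))),
       ("101-200", c + L.countP (fun l => decide (100 < l ∧ l ≤ 200))),
       ("201-300", d + L.countP (fun l => decide (200 < l ∧ l ≤ 300))),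
       ("301-400", e + L.countP (fun l => decide (300 < l ∧ l ≤ 400))),
       ("401+", f + L.countP (fun l => decide (400 < l)))] := by
  induction L generalizing a b c d e f with
  | nil => simp
  | cons x t ih =>
    rw [List.foldl_cons, aStep_bins]
    split_ifs with h1 h2 h3 h4 h5 <;> rw [ih] <;> simp_all [List.countP_cons] <;> omega

-- a k-prefix characterisation: if membership of ≤ x is exactly 'index < k', the count is k
lemma countP_le_of_index_iff (xs : List Int) (x : Int) (k : Nat) (hk : k ≤ xs.length)
    (h : ∀ (j : Nat) (hj : j < xs.length), xs[j] ≤ x ↔ j < k) :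
    xs.countP (fun l => decide (l ≤ x)) = k := by
  induction xs generalizing k with
  | nil => simpa using (Nat.le_zero.mp hk).symm
  | cons a t ih =>
    cases k with
    | zero =>
      have ha : ¬ a ≤ x := by
        intro hx
        exact absurd ((h 0 (by simp)).mp hx) (by omega)
      have ht : t.countP (fun l => decide (l ≤ x)) = 0 := by
        apply ih 0 (by omega)
        intro j hj
        have hh := h (j + 1) (by simpa using hj)
        simp only [List.getElem_cons_succ] at hh
        exact ⟨fun hx => absurd (hh.mp hx) (by omega), fun hx => absurd hx (by omega)⟩
      simp [ha, ht]
    | succ k' =>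
      have ha : a ≤ x := (h 0 (by simp)).mpr (by omega)
      have ht : t.countP (fun l => decide (l ≤ x)) = k' := by
        apply ih k' (by simpa using hk)
        intro j hj
        have hh := h (j + 1) (by simpa using hj)
        simp only [List.getElem_cons_succ] at hh
        exact hh.trans (by omega)
      simp [ha, ht]

-- bisect_right on a sorted list returns the number of elements ≤ x
lemma bisectRight_eq_countP (xs : List Int) (x : Int)
    (hs : xs.Pairwise (fun a b => a ≤ b)) :
    PySem.List.bisectRight xs x = xs.countP (fun l => decide (l ≤ x)) := by
  obtain ⟨hle, hlt, hgt⟩ := PySem.List.bisectRight_spec xs x hs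
  exact (countP_le_of_index_iff xs x _ hle (by
    intro j hj
    constructor
    · intro hx
      by_contra hc
      exact absurd (hgt j hj (by omega)) (by omega)
    · intro hx
      exact hlt j hj hx)).symm

-- counting a half-open interval as the difference of two cumulative counts
lemma countP_interval (L : List Int) (x y : Int) (hxy : x ≤ y) :
    L.countP (fun l => decide (x < l) && decide (l ≤ y))
      = L.countP (fun l => decide (l ≤ y)) - L.countP (fun l => decide (l ≤ x)) ∧
    L.countP (fun l => decide (l ≤ x)) ≤ L.countP (fun l => decide (l ≤ y)) := by
  induction L with
  | nil => simp
  | cons a t ih =>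
    obtain ⟨ih1, ih2⟩ := ih
    by_cases h1 : a ≤ x <;> by_cases h2 : a ≤ y
    · simp [h1, h2, show ¬ x < a by omega]; omega
    · exact absurd (le_trans h1 hxy) h2
    · simp [h1, h2, show x < a by omega]; omega
    · simp [h1, h2, show x < a by omega]; omega

-- the last bin: elements above 400 are the rest of the list
lemma countP_above (L : List Int) (x : Int) :
    L.countP (fun l => decide (x < l)) = L.length - L.countP (fun l => decide (l ≤ x)) ∧
    L.countP (fun l => decide (l ≤ x)) ≤ L.length := by
  induction L with
  | nil => simp
  | cons a t ih =>
    obtain ⟨ih1, ih2⟩ := ih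
    by_cases h1 : a ≤ x
    · simp [h1, show ¬ x < a by omega]; omega
    · simp [h1, show x < a by omega]; omega

-- ===== VERDICT (by name: the statement is the Claim_ definition above) =====
theorem analyze_sentence_distribution_spec : Claim_equal_analyze_sentence_distribution := by
  intro sentences_data _
  unfold Spec_analyze_sentence_distribution analyze_sentence_distribution analyze_sentence_distribution_alt
  set L : List Int := sentences_data.map (fun s => (PySem.Str.len s : Int)) with hL
  set S : List Int := PySem.List.sorted L (fun x => x) false with hS
  have hperm : S.Perm L := PySem.List.sorted_perm L (fun x => x) false
  have hpw : S.Pairwise (fun a b => a ≤ b) := PySem.List.sorted_pairwise L (fun x => x)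
  have hlen : S.length = L.length := hperm.length_eq
  have hcnt : ∀ x : Int, PySem.List.bisectRight S x = L.countP (fun l => decide (l ≤ x)) := by
    intro x
    rw [bisectRight_eq_countP S x hpw, hperm.countP_eq]
  simp only [aFold_items, hcnt, hlen]
  have i1 := countP_interval L 50 100 (by omega)
  have i2 := countP_interval L 100 200 (by omega)
  have i3 := countP_interval L 200 300 (by omega)
  have i4 := countP_interval L 300 400 (by omega)
  have i5 := countP_above L 400
  simp only [List.cons.injEq, Prod.mk.injEq, true_and, and_true, ]
  refine ⟨?_, ?_, ?_, ?_, ?_, ?_⟩ <;> simp <;> omega
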